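-- pv_equiv track=rewrite | github.com/aitoralmeida/activity_segmentation | segmentation/unsupervised/likelihood/feature_extraction/feature_extraction_likelihood.py | extract_features_from_sensors
-- ===== SOURCE A (Python) =====
-- def extract_features_from_sensors(actions, unique_actions, all_actions, position, all_timestamps):
--     features_from_sensors = []
--
--     # count of events for each sensor in window
--     for action in unique_actions:
--         counter = 0
--         for action_fired in actions:
--             if action == action_fired:
--                 counter += 1
--         features_from_sensors.append(counter)
--
--     # elapsed time for each sensor since last event
--     found_actions = []
--     counter = position
--     last_event_timestamp = all_timestamps[position]
--     last_sensor_timestamp = None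
--     for action in unique_actions:
--         while(counter >= 0):
--             if action == all_actions[counter]:
--                 found_actions.append(action)
--                 last_sensor_timestamp = all_timestamps[counter]
--                 break
--             counter -= 1
--         if action not in found_actions:
--             features_from_sensors.append(all_timestamps[-1] - all_timestamps[0]) # maximum time possible
--         else:
--             features_from_sensors.append(last_event_timestamp - last_sensor_timestamp)
--         counter = position
--         last_sensor_timestamp = None
--
--     return features_from_sensors
-- ===== SOURCE B (Python) =====
-- def extract_features_from_sensors(actions, unique_actions, all_actions, position, all_timestamps):
--     # per-sensor feature records seeded from unique_actions, filled by two shared passes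
--     counts = {}
--     for a in unique_actions:
--         counts[a] = 0
--     for a in actions:
--         if a in counts:
--             counts[a] += 1
--     last_event = all_timestamps[position]
--     max_time = all_timestamps[-1] - all_timestamps[0]
--     elapsed = {}
--     for a in unique_actions:
--         elapsed[a] = max_time          # default: never seen up to `position`
--     remaining = set(unique_actions)
--     i = position
--     # ONE shared backward scan over the history; stops as soon as every sensor was seen
--     while i >= 0 and remaining:
--         a = all_actions[i]
--         if a in remaining:
--             elapsed[a] = last_event - all_timestamps[i]
--             remaining.discard(a)
--         i -= 1
--     return [counts[a] for a in unique_actions] + [elapsed[a] for a in unique_actions]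
-- ===== Notes on version B (the rewrite author's own statement) =====
-- stated objective: faster
-- what changed: A restarts a backward while-scan over all_actions once per unique action (and re-scans the window per action for counts); B seeds per-sensor count and elapsed records from unique_actions, fills counts in one pass over the window, and fills all elapsed times in ONE shared backward scan over the history that stops early once every sensor has been seen, then assembles the output by lookups.
import Mathlib
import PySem

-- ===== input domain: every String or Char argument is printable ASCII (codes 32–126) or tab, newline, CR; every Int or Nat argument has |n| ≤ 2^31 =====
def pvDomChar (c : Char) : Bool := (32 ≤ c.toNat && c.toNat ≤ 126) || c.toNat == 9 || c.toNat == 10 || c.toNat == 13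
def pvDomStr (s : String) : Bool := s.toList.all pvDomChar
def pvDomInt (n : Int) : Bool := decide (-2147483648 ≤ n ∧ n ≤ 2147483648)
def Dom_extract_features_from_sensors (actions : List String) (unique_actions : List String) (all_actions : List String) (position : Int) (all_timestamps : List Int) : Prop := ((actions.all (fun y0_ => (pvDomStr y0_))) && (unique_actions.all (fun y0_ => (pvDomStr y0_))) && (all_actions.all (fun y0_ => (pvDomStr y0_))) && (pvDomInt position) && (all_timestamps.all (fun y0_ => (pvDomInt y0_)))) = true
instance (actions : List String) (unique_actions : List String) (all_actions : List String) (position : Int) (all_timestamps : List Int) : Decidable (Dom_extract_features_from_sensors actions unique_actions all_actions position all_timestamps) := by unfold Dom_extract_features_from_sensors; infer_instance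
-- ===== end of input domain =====

-- B replaces A's per-unique-action backward re-scans by seeded per-sensor records filled by one
-- pass over the window (counts) and ONE shared, early-stopping backward scan over the history
-- (elapsed times), then assembles the output by lookups: asymptotically faster.


-- ===== PORT A =====
-- A's inner while-loop: scan all_actions backward from `counter`; on a match return
-- that event's timestamp (last_sensor_timestamp), on reaching -1 return none.
def pvFindBack (all_actions : List String) (all_timestamps : List Int) (action : String) (counter : Int) : Option Int :=
  if 0 ≤ counter then
    if PySem.List.pyGetD all_actions counter "" == action then
      some (PySem.List.pyGetD all_timestamps counter 0)
    else pvFindBack all_actions all_timestamps action (counter - 1)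
  else none
termination_by (counter + 1).toNat
decreasing_by omega

def extract_features_from_sensors (actions : List String) (unique_actions : List String) (all_actions : List String) (position : Int) (all_timestamps : List Int) : List Int :=
  -- count of events for each sensor in window
  let features1 := unique_actions.foldl (fun feats action =>
      feats ++ [actions.foldl (fun counter action_fired =>
        if action == action_fired then counter + 1 else counter) (0 : Int)]) ([] : List Int)
  -- elapsed time for each sensor since last event
  let last_event_timestamp := PySem.List.pyGetD all_timestamps position 0
  let st := unique_actions.foldl (fun (st : List Int × List String) action =>
      match pvFindBack all_actions all_timestamps action position with
      | some last_sensor_timestamp =>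
          let found_actions := st.2 ++ [action]
          if action ∈ found_actions then
            (st.1 ++ [last_event_timestamp - last_sensor_timestamp], found_actions)
          else
            (st.1 ++ [PySem.List.pyGetD all_timestamps (-1) 0 - PySem.List.pyGetD all_timestamps 0 0], found_actions)
      | none =>
          -- `action ∈ st.2` here is unreachable (the backward search is deterministic, so a
          -- previously found action is found again); Python would hit `last_event - None` there
          (st.1 ++ [PySem.List.pyGetD all_timestamps (-1) 0 - PySem.List.pyGetD all_timestamps 0 0], st.2)
      ) (features1, [])
  st.1

-- ===== PORT B =====
-- B's while-loop: ONE shared backward scan from `position`; each sensor still in `remaining`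
-- gets its elapsed-time record overwritten at its first (nearest) occurrence and is removed;
-- the scan stops at index -1 or as soon as `remaining` is empty.
def pvBackScan (all_actions : List String) (all_timestamps : List Int) (last_event : Int)
    (elapsed : PySem.Dict String Int) (remaining : PySem.Set String) (i : Int) :
    PySem.Dict String Int :=
  if 0 ≤ i ∧ remaining ≠ [] then
    -- a = all_actions[i] (the subscript written out at both uses)
    if PySem.List.pyGetD all_actions i "" ∈ remaining then
      pvBackScan all_actions all_timestamps last_event
        (elapsed.insert (PySem.List.pyGetD all_actions i "")
          (last_event - PySem.List.pyGetD all_timestamps i 0))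
        (PySem.Set.discard remaining (PySem.List.pyGetD all_actions i "")) (i - 1)
    else
      pvBackScan all_actions all_timestamps last_event elapsed remaining (i - 1)
  else elapsed
termination_by (i + 1).toNat
decreasing_by all_goals omega

def extract_features_from_sensors_alt (actions : List String) (unique_actions : List String) (all_actions : List String) (position : Int) (all_timestamps : List Int) : List Int :=
  let counts0 := unique_actions.foldl (fun d a => d.insert a (0 : Int)) PySem.Dict.empty
  let counts := actions.foldl (fun d a =>
      if d.contains a then d.insert a (d.getD a 0 + 1) else d) counts0
  let last_event := PySem.List.pyGetD all_timestamps position 0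
  let max_time := PySem.List.pyGetD all_timestamps (-1) 0 - PySem.List.pyGetD all_timestamps 0 0
  let elapsed0 := unique_actions.foldl (fun d a => d.insert a max_time) PySem.Dict.empty
  let elapsed := pvBackScan all_actions all_timestamps last_event elapsed0
      (PySem.Set.ofList unique_actions) position
  -- counts[a] / elapsed[a]: every a ∈ unique_actions is a key of both dicts, so the Python
  -- subscript never raises; getD's default is unreachable
  unique_actions.map (fun a => counts.getD a 0) ++ unique_actions.map (fun a => elapsed.getD a 0)

-- ===== PRECONDITION & SPEC =====
-- Pre_ excludes exactly the inputs on which the Python A raises IndexError: all_timestamps[position]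
-- out of range (including negative wraparound), or the backward scan's first read all_actions[position]
-- past the end (reached iff unique_actions is nonempty and position ≥ 0). B raises on the same inputs.
def Pre_extract_features_from_sensors (actions : List String) (unique_actions : List String) (all_actions : List String) (position : Int) (all_timestamps : List Int) : Prop :=
  -(all_timestamps.length : Int) ≤ position ∧ position < (all_timestamps.length : Int) ∧
  (position < 0 ∨ unique_actions = [] ∨ position < (all_actions.length : Int))
instance (actions : List String) (unique_actions : List String) (all_actions : List String) (position : Int) (all_timestamps : List Int) : Decidable (Pre_extract_features_from_sensors actions unique_actions all_actions position all_timestamps) := by unfold Pre_extract_features_from_sensors; infer_instance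

def pvWitness_extract_features_from_sensors : List String × List String × List String × Int × List Int :=
  (["a"], ["a", "b"], ["b", "a"], 1, [3, 7])

def Spec_extract_features_from_sensors (actions : List String) (unique_actions : List String) (all_actions : List String) (position : Int) (all_timestamps : List Int) (out : List Int) : Prop := out = extract_features_from_sensors_alt actions unique_actions all_actions position all_timestamps
instance (actions : List String) (unique_actions : List String) (all_actions : List String) (position : Int) (all_timestamps : List Int) (out : List Int) : Decidable (Spec_extract_features_from_sensors actions unique_actions all_actions position all_timestamps out) := by unfold Spec_extract_features_from_sensors; infer_instance

-- ===== CLAIM (what is proved, stated in full; the proofs are below) =====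
def Claim_equal_extract_features_from_sensors : Prop := ∀ (actions : List String) (unique_actions : List String) (all_actions : List String) (position : Int) (all_timestamps : List Int), Dom_extract_features_from_sensors actions unique_actions all_actions position all_timestamps → Pre_extract_features_from_sensors actions unique_actions all_actions position all_timestamps → Spec_extract_features_from_sensors actions unique_actions all_actions position all_timestamps (extract_features_from_sensors actions unique_actions all_actions position all_timestamps)

-- ===== LEMMAS AND PROOFS =====

theorem pvWitness_ok :
    Dom_extract_features_from_sensors (pvWitness_extract_features_from_sensors.1) (pvWitness_extract_features_from_sensors.2.1) (pvWitness_extract_features_from_sensors.2.2.1) (pvWitness_extract_features_from_sensors.2.2.2.1) (pvWitness_extract_features_from_sensors.2.2.2.2) ∧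
    Pre_extract_features_from_sensors (pvWitness_extract_features_from_sensors.1) (pvWitness_extract_features_from_sensors.2.1) (pvWitness_extract_features_from_sensors.2.2.1) (pvWitness_extract_features_from_sensors.2.2.2.1) (pvWitness_extract_features_from_sensors.2.2.2.2) := by
  decide

-- a fold inserting the same constant value at every key of l
theorem get?_foldl_insert_const (l : List String) (d : PySem.Dict String Int) (a : String)
    (v : Int) :
    (l.foldl (fun d x => d.insert x v) d).get? a = if a ∈ l then some v else d.get? a := by
  induction l generalizing d with
  | nil => simp
  | cons x t ih =>
      rw [List.foldl_cons, ih, PySem.Dict.get?_insert]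
      by_cases ht : a ∈ t
      · simp [ht]
      · by_cases hax : a = x <;> simp [ht, hax]

-- B's counting pass: starting from a dict that already has key a, it adds actions.count a to it
theorem getD_count_fold (acts : List String) (d : PySem.Dict String Int) (a : String)
    (ha : d.contains a = true) :
    (acts.foldl (fun d x => if d.contains x then d.insert x (d.getD x 0 + 1) else d) d).getD a 0
    = d.getD a 0 + acts.count a := by
  induction acts generalizing d with
  | nil => simp
  | cons x t ih =>
      rw [List.foldl_cons, List.count_cons]
      by_cases hx : d.contains x = true
      · rw [if_pos hx, ih _ (by rw [PySem.Dict.contains_insert, ha, Bool.or_true]),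
          PySem.Dict.getD_insert]
        by_cases hax : a = x
        · subst hax; simp; omega
        · simp [hax]
          exact fun e => hax e.symm
      · rw [if_neg hx, ih _ ha]
        have hax : ¬ x = a := fun e => hx (e ▸ ha)
        simp [hax]

theorem findBack_neg (all_actions : List String) (all_timestamps : List Int) (a : String)
    (p : Int) (hp : p < 0) : pvFindBack all_actions all_timestamps a p = none := by
  rw [pvFindBack]
  simp [show ¬ (0 ≤ p) by omega]

-- B's shared backward scan, looked up at any key: for keys still in `remaining` it is exactly
-- A's per-key backward search; keys outside `remaining` are never touched.
theorem backScan_get? (aa : List String) (ts : List Int) (le : Int)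
    (elapsed : PySem.Dict String Int) (remaining : PySem.Set String) (i : Int) (a : String) :
    (pvBackScan aa ts le elapsed remaining i).get? a
    = if a ∈ remaining then
        (match pvFindBack aa ts a i with
         | some t => some (le - t)
         | none => elapsed.get? a)
      else elapsed.get? a := by
  rw [pvBackScan]
  by_cases hi : 0 ≤ i
  · by_cases hr : remaining ≠ []
    · rw [if_pos ⟨hi, hr⟩]
      by_cases hbr : PySem.List.pyGetD aa i "" ∈ remaining
      · rw [if_pos hbr, backScan_get?]
        by_cases hab : a = PySem.List.pyGetD aa i ""
        · have hfb : pvFindBack aa ts a i = some (PySem.List.pyGetD ts i 0) := by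
            rw [pvFindBack, if_pos hi, if_pos (by simp [hab])]
          rw [if_neg (by simp [PySem.Set.mem_discard, hab]), if_pos (hab ▸ hbr), hfb,
            hab, PySem.Dict.get?_insert_self]
        · have hfb : pvFindBack aa ts a i = pvFindBack aa ts a (i - 1) := by
            rw [pvFindBack, if_pos hi, if_neg (by simp; exact fun e => hab e.symm)]
          by_cases har : a ∈ remaining
          · rw [if_pos (by simp [PySem.Set.mem_discard, har, hab]), if_pos har, hfb]
            cases pvFindBack aa ts a (i - 1) with
            | some t => rfl
            | none => rw [PySem.Dict.get?_insert]; simp [hab]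
          · rw [if_neg (by simp [PySem.Set.mem_discard, har]), if_neg har,
              PySem.Dict.get?_insert]
            simp [hab]
      · rw [if_neg hbr, backScan_get?]
        by_cases har : a ∈ remaining
        · have hab : a ≠ PySem.List.pyGetD aa i "" := fun e => hbr (e ▸ har)
          have hfb : pvFindBack aa ts a i = pvFindBack aa ts a (i - 1) := by
            rw [pvFindBack, if_pos hi, if_neg (by simp; exact fun e => hab e.symm)]
          rw [if_pos har, if_pos har, hfb]
        · rw [if_neg har, if_neg har]
    · rw [if_neg (by tauto)]
      have hnm : a ∉ remaining := by
        have hre : remaining = [] := by tauto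
        subst hre; simp
      rw [if_neg hnm]
  · rw [if_neg (by tauto), findBack_neg aa ts a i (by omega)]
    split_ifs <;> rfl
termination_by (i + 1).toNat
decreasing_by all_goals omega

-- A's second loop, with the invariant that every recorded action is indeed findable,
-- appends exactly the per-action feature given by the backward search.
theorem loop2_eq_map (all_actions : List String) (all_timestamps : List Int) (position le mt : Int)
    (ua : List String) :
    ∀ (feats : List Int) (found : List String),
    (ua.foldl (fun (st : List Int × List String) action =>
      match pvFindBack all_actions all_timestamps action position with
      | some t =>
          let found_actions := st.2 ++ [action]
          if action ∈ found_actions then (st.1 ++ [le - t], found_actions)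
          else (st.1 ++ [mt], found_actions)
      | none => (st.1 ++ [mt], st.2)) (feats, found)).1
    = feats ++ ua.map (fun action =>
        match pvFindBack all_actions all_timestamps action position with
        | some t => le - t
        | none => mt) := by
  induction ua with
  | nil => intro feats found; simp
  | cons a t ih =>
      intro feats found
      rw [List.foldl_cons, List.map_cons]
      show (t.foldl _ (match pvFindBack all_actions all_timestamps a position with
        | some v =>
            let found_actions := found ++ [a]
            if a ∈ found_actions then (feats ++ [le - v], found_actions)
            else (feats ++ [mt], found_actions)
        | none => (feats ++ [mt], found))).1 = _
      cases h : pvFindBack all_actions all_timestamps a position with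
      | some v =>
          simp only [List.mem_append, List.mem_singleton, or_true, if_true] at ih ⊢
          rw [ih, List.append_assoc]
          rfl
      | none =>
          simp only [List.mem_append, List.mem_singleton, or_true, if_true] at ih ⊢
          rw [ih, List.append_assoc]
          rfl

theorem extract_eq (actions : List String) (unique_actions : List String) (all_actions : List String) (position : Int) (all_timestamps : List Int) :
    extract_features_from_sensors actions unique_actions all_actions position all_timestamps
    = extract_features_from_sensors_alt actions unique_actions all_actions position all_timestamps := by
  simp only [extract_features_from_sensors, extract_features_from_sensors_alt]
  rw [loop2_eq_map, PySem.List.foldl_append_singleton_eq_map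
    (f := fun action => actions.foldl (fun counter action_fired =>
      if action == action_fired then counter + 1 else counter) (0 : Int)), List.nil_append]
  refine congrArg₂ (· ++ ·) ?_ ?_
  · refine List.map_congr_left (fun a ha => ?_)
    have h0 : ((unique_actions.foldl (fun d x => d.insert x (0 : Int)) PySem.Dict.empty)).get? a
        = some 0 := by rw [get?_foldl_insert_const, if_pos ha]
    have hA : actions.foldl (fun counter action_fired =>
          if a == action_fired then counter + 1 else counter) (0 : Int)
        = actions.foldl (fun counter x => if x == a then counter + 1 else counter) (0 : Int) := by
      refine PySem.List.foldl_congr_mem _ _ _ _ (fun acc x _ => ?_)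
      rcases eq_or_ne a x with h | h
      · simp [h]
      · simp [beq_iff_eq, h, h.symm]
    rw [getD_count_fold _ _ _ (by rw [PySem.Dict.contains_eq_isSome_get?, h0]; rfl),
      PySem.Dict.getD_eq_get?_getD, h0, Option.getD_some, zero_add, hA,
      PySem.List.foldl_beq_add_one, zero_add]
  · refine List.map_congr_left (fun a ha => ?_)
    rw [PySem.Dict.getD_eq_get?_getD, backScan_get?,
      if_pos ((PySem.Set.mem_ofList _ _).mpr ha)]
    cases pvFindBack all_actions all_timestamps a position with
    | some t => rfl
    | none => rw [get?_foldl_insert_const, if_pos ha]; rfl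

-- ===== VERDICT (by name: the statement is the Claim_ definition above) =====
theorem extract_features_from_sensors_spec : Claim_equal_extract_features_from_sensors := by
  intro actions unique_actions all_actions position all_timestamps _ _
  unfold Spec_extract_features_from_sensors
  exact extract_eq actions unique_actions all_actions position all_timestamps
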